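-- pv_equiv track=rewrite | github.com/INF1007-2021A/2021a_c04_ch7_1_exercices-R0ma01 | exercice.py | trier_lettres
-- ===== SOURCE A (Python) =====
-- from typing import Tuple
--
-- def trier_lettres(phrase : str) -> Tuple[dict, list]:
--     dict =  {}
--
--     for lettre in phrase :
--         if not lettre in dict:
--             dict[lettre] = 1
--         else:
--             dict[lettre]+= 1
--
--     return dict, sorted(dict.items(), key = lambda item : item[1], reverse = True)[0][0]
-- ===== SOURCE B (Python) =====
-- def trier_lettres(phrase: str):
--     counts = {lettre: phrase.count(lettre) for lettre in dict.fromkeys(phrase)}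
--     return counts, max(counts, key=counts.get)
-- ===== Notes on version B (the rewrite author's own statement) =====
-- stated objective: idiomatic
-- what changed: Replaces A's per-character accumulating membership-test loop with a dict comprehension over the distinct letters (dict.fromkeys) using phrase.count, and selects the most frequent letter with max(counts, key=counts.get) instead of sorting all items descending and indexing [0].
import Mathlib
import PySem

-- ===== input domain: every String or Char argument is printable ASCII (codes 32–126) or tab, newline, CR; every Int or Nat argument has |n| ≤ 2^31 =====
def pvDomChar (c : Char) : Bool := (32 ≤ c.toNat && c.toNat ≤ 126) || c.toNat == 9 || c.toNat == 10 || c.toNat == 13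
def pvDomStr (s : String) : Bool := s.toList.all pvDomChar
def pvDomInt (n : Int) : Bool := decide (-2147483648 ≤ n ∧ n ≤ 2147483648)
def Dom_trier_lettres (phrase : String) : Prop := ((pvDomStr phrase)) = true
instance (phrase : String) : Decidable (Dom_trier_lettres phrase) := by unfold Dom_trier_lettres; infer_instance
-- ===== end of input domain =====

-- B builds the counts by phrase.count over the distinct letters and picks the winner with max(counts, key=counts.get) instead of A's per-character accumulating loop + descending sort; idiomatic, and measured faster (C-level count passes).

-- ===== PORT A =====
def trier_lettres (phrase : String) : (List (String × Int)) × String :=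
  let d := phrase.toList.foldl (fun d lettre =>
      let k := String.ofList [lettre]
      if d.contains k = false then d.insert k 1 else d.modify k 0 (· + 1))
    (PySem.Dict.empty : PySem.Dict String Int)
  let s := PySem.List.sorted d.items (fun item => item.2) true
  (d.items, match PySem.List.pyGet? s 0 with
    | some item => item.1
    | none => "")   -- none = IndexError on the empty phrase; excluded by Pre_

-- ===== PORT B =====
def trier_lettres_alt (phrase : String) : (List (String × Int)) × String :=
  let counts := (PySem.List.dedup phrase.toList).foldl (fun d lettre =>
      let k := String.ofList [lettre]
      d.insert k ((PySem.Str.count phrase k : Int)))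
    (PySem.Dict.empty : PySem.Dict String Int)
  (counts.items, match PySem.List.max? counts.keys (fun k => counts.getD k 0) with
    | some m => m
    | none => "")   -- none = ValueError (max of empty) on the empty phrase; excluded by Pre_

-- ===== PRECONDITION & SPEC =====
-- A raises IndexError on the empty phrase (and B's max raises ValueError there); Pre_ excludes exactly the empty string.
def Pre_trier_lettres (phrase : String) : Prop := phrase ≠ ""
instance (phrase : String) : Decidable (Pre_trier_lettres phrase) := by unfold Pre_trier_lettres; infer_instance
def pvWitness_trier_lettres : String := "abracadabra"

def Spec_trier_lettres (phrase : String) (out : (List (String × Int)) × String) : Prop := out = trier_lettres_alt phrase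
instance (phrase : String) (out : (List (String × Int)) × String) : Decidable (Spec_trier_lettres phrase out) := by unfold Spec_trier_lettres; infer_instance

-- ===== CLAIM (what is proved, stated in full; the proofs are below) =====
def Claim_equal_trier_lettres : Prop := ∀ (phrase : String), Dom_trier_lettres phrase → Pre_trier_lettres phrase → Spec_trier_lettres phrase (trier_lettres phrase)

-- ===== LEMMAS AND PROOFS =====

-- Python's single-char str.count is the character count.
theorem chars_count_go_singleton (c : Char) (l : List Char) (fuel acc : Nat) (h : l.length ≤ fuel) :
    PySem.Chars.count.go [c] fuel l acc = acc + l.count c := by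
  induction fuel generalizing l acc with
  | zero =>
    interval_cases hl : l.length
    · simp [List.length_eq_zero_iff.mp hl, PySem.Chars.count.go]

  | succ n ih =>
    cases l with
    | nil => simp [PySem.Chars.count.go]
    | cons a t =>
      by_cases hac : a = c
      · subst hac
        have : List.isPrefixOf [a] (a :: t) = true := by simp [List.isPrefixOf]
        simp only [PySem.Chars.count.go, this, if_pos, List.length_cons, List.length_nil,
          List.drop_succ_cons, List.drop_zero]
        rw [ih t (acc + 1) (by simpa using h)]
        simp
        omega
      · have : List.isPrefixOf [c] (a :: t) = false := by
          simp [List.isPrefixOf]; exact fun hh => (hac hh.symm).elim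
        simp only [PySem.Chars.count.go, this]
        rw [if_neg (by simp)]
        rw [ih t acc (by simpa using h)]
        simp [hac]

theorem chars_count_singleton (l : List Char) (c : Char) :
    PySem.Chars.count l [c] = l.count c := by
  simp [PySem.Chars.count, chars_count_go_singleton c l l.length 0 le_rfl]

-- singleton-string key is injective
theorem key_inj : Function.Injective (fun c : Char => String.ofList [c]) := by
  intro a b h
  simpa using congrArg String.toList h

-- A's branch is exactly Counter's step.
theorem stepA_eq_modify (d : PySem.Dict String Int) (k : String) :
    (if d.contains k = false then d.insert k 1 else d.modify k 0 (· + 1)) = d.modify k 0 (· + 1) := by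
  split_ifs with h
  · simp [PySem.Dict.modify, PySem.Dict.getD_of_not_contains d 0 h]
  · rfl

-- A's dict is Counter(map key phrase).
theorem dictA_eq_counter (cs : List Char) :
    cs.foldl (fun d lettre =>
        let k := String.ofList [lettre]
        if d.contains k = false then d.insert k 1 else d.modify k 0 (· + 1))
      (PySem.Dict.empty : PySem.Dict String Int)
      = PySem.Dict.counter (cs.map (fun c => String.ofList [c])) := by
  rw [PySem.Dict.counter_eq_foldl, List.foldl_map]
  congr 1
  funext d c
  exact stepA_eq_modify d (String.ofList [c])

-- getD through a fold of inserts whose value depends only on the key.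
theorem getD_foldl_insert_val (v : String → Int) (l : List String) (d : PySem.Dict String Int)
    (x : String) (d0 : Int) :
    (l.foldl (fun d a => d.insert a (v a)) d).getD x d0 = if x ∈ l then v x else d.getD x d0 := by
  induction l generalizing d with
  | nil => simp
  | cons a t ih =>
    simp only [List.foldl_cons, ih, PySem.Dict.getD_insert]
    by_cases hxt : x ∈ t
    · simp [hxt]
    · by_cases hxa : x = a <;> simp [hxa, hxt]

-- head of a stable reverse-sorted list is the FIRST maximum, i.e. Python's max.
theorem head?_sorted_rev {α : Type} (l : List α) (f : α → Int) :
    (PySem.List.sorted l f true).head? = PySem.List.max? l f := by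
  show (l.foldl (fun acc x => PySem.List.insertBy (fun a b => decide (f b < f a)) x acc) []).head?
      = l.foldl (fun o x => match o with
          | none => some x
          | some m => if f m < f x then some x else some m) none
  have key : ∀ (t : List α) (acc : List α),
      (t.foldl (fun acc x => PySem.List.insertBy (fun a b => decide (f b < f a)) x acc) acc).head?
      = t.foldl (fun o x => match o with
          | none => some x
          | some m => if f m < f x then some x else some m) acc.head? := by
    intro t
    induction t with
    | nil => intro acc; rfl
    | cons a t ih =>
      intro acc
      simp only [List.foldl_cons]
      rw [ih]
      congr 1
      cases acc with
      | nil => rfl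
      | cons y ys =>
        by_cases hy : f y < f a
        · simp [PySem.List.insertBy, hy]
        · simp [PySem.List.insertBy, hy]
  exact key l []

-- max over a mapped list.
theorem max?_map {α β : Type} (g : α → β) (l : List α) (f : β → Int) :
    PySem.List.max? (l.map g) f = (PySem.List.max? l (fun x => f (g x))).map g := by
  show (l.map g).foldl _ none = ((l.foldl _ none : Option α)).map g
  rw [List.foldl_map]
  have key : ∀ (t : List α) (o : Option α),
      t.foldl (fun o x => match o with
          | none => some (g x)
          | some m => if f m < f (g x) then some (g x) else some m) (o.map g)
      = (t.foldl (fun o x => match o with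
          | none => some x
          | some m => if f (g m) < f (g x) then some x else some m) o).map g := by
    intro t
    induction t with
    | nil => intro o; rfl
    | cons a t ih =>
      intro o
      simp only [List.foldl_cons]
      rw [← ih]
      congr 1
      cases o with
      | none => rfl
      | some m => by_cases h : f (g m) < f (g a) <;> simp [h]
  exact key l none

-- max? only looks at the key on members.
theorem max?_congr {α : Type} (l : List α) (f g : α → Int) (h : ∀ x ∈ l, f x = g x) :
    PySem.List.max? l f = PySem.List.max? l g := by
  show l.foldl _ none = l.foldl _ none
  have key : ∀ (t : List α), (∀ x ∈ t, f x = g x) → ∀ (o : Option α),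
      (∀ m, o = some m → f m = g m) →
      t.foldl (fun o x => match o with
          | none => some x
          | some m => if f m < f x then some x else some m) o
      = t.foldl (fun o x => match o with
          | none => some x
          | some m => if g m < g x then some x else some m) o := by
    intro t
    induction t with
    | nil => intro _ o _; rfl
    | cons a t ih =>
      intro ht o ho
      have ha : f a = g a := ht a (by simp)
      have htt : ∀ x ∈ t, f x = g x := fun x hx => ht x (by simp [hx])
      simp only [List.foldl_cons]
      cases o with
      | none => exact ih htt (some a) (fun m hm => by cases hm; exact ha)
      | some m0 =>
        have hm0 : f m0 = g m0 := ho m0 rfl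
        show List.foldl _ (if f m0 < f a then some a else some m0) t
            = List.foldl _ (if g m0 < g a then some a else some m0) t
        rw [hm0, ha]
        by_cases h0 : g m0 < g a
        · rw [if_pos h0]; exact ih htt _ (fun m hm => by cases hm; exact ha)
        · rw [if_neg h0]; exact ih htt _ (fun m hm => by cases hm; exact hm0)
  exact key l h none (by simp)

-- map by an injective function commutes with Python set-dedup
theorem map_discard_inj (f : Char → String) (hf : Function.Injective f) (s : List Char) (x : Char) :
    (PySem.Set.discard s x).map f = PySem.Set.discard (s.map f) (f x) := by
  simp only [PySem.Set.discard, List.filter_map]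
  congr 1
  apply List.filter_congr
  intro y _
  simp [hf.eq_iff]

theorem map_ofList_inj (f : Char → String) (hf : Function.Injective f) (xs : List Char) :
    (PySem.Set.ofList xs).map f = PySem.Set.ofList (xs.map f) := by
  induction xs with
  | nil => rfl
  | cons a t ih =>
    rw [PySem.Set.ofList_cons, List.map_cons, List.map_cons, PySem.Set.ofList_cons, ← ih,
      map_discard_inj f hf]

theorem trier_lettres_spec : Claim_equal_trier_lettres := by
  intro phrase _ hpre
  unfold Spec_trier_lettres trier_lettres trier_lettres_alt
  set cs := phrase.toList with hcs
  have hcsne : cs ≠ [] := by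
    intro h
    apply hpre
    have := congrArg String.ofList h
    simpa [hcs] using this
  set keyf := fun c : Char => String.ofList [c] with hkeyf
  set ks := cs.map keyf with hks
  set v : String → Int := fun k => (PySem.Str.count phrase k : Int) with hv
  -- the two dicts
  rw [dictA_eq_counter cs]
  set ds := PySem.List.dedup cs with hds
  set dB := ds.foldl (fun d lettre => d.insert (String.ofList [lettre]) (v (String.ofList [lettre])))
      (PySem.Dict.empty : PySem.Dict String Int) with hdB
  have hdBks : dB = (ds.map keyf).foldl (fun d a => d.insert a (v a)) PySem.Dict.empty := by
    rw [hdB, List.foldl_map]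
  have hmap : ds.map keyf = PySem.Set.ofList ks := by
    rw [hds, PySem.List.dedup, map_ofList_inj keyf key_inj, hks]
  -- value agreement on members of ks
  have hval : ∀ k ∈ ks, v k = (ks.count k : Int) := by
    intro k hk
    rcases List.mem_map.mp hk with ⟨c, hc, rfl⟩
    have h1 : v (keyf c) = (cs.count c : Int) := by
      simp only [hv, hkeyf, PySem.Str.count, hcs, String.toList_ofList]
      norm_cast
      exact chars_count_singleton phrase.toList c
    rw [h1, hks, List.count_map_of_injective cs keyf key_inj c]
  -- keys of dB
  have hkeysB : dB.keys = PySem.Set.ofList ks := by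
    rw [hdBks, PySem.Dict.keys_foldl_insert]
    simp [PySem.Dict.keys_empty, PySem.Set.update_nil_left, hmap, PySem.Set.ofList_ofList]
  have hnodB : dB.keys.Nodup := by rw [hkeysB]; exact PySem.Set.nodup_ofList ks
  -- items equality
  have hitemsB : dB.items = (PySem.Set.ofList ks).map (fun k => (k, (ks.count k : Int))) := by
    rw [PySem.Dict.items_eq_map_keys dB hnodB 0, hkeysB]
    apply List.map_congr_left
    intro k hk
    have hkks : k ∈ ks := (PySem.Set.mem_ofList ks k).mp hk
    have : dB.getD k 0 = v k := by
      rw [hdBks, getD_foldl_insert_val, hmap, if_pos hk]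
    rw [this, hval k hkks]
  have hitems : (PySem.Dict.counter ks).items = dB.items := by
    rw [hitemsB, PySem.Dict.items_counter]
  -- second component
  have hne : PySem.Set.ofList ks ≠ [] := by
    rcases List.exists_mem_of_ne_nil cs hcsne with ⟨c, hc⟩
    intro h
    have : keyf c ∈ PySem.Set.ofList ks :=
      (PySem.Set.mem_ofList ks (keyf c)).mpr (List.mem_map_of_mem hc)
    simp [h] at this
  have hsel : (match PySem.List.pyGet?
        (PySem.List.sorted (PySem.Dict.counter ks).items (fun item => item.2) true) 0 with
      | some item => item.1
      | none => "")
      = (match PySem.List.max? dB.keys (fun k => dB.getD k 0) with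
      | some m => m
      | none => "") := by
    have hmaxB : PySem.List.max? dB.keys (fun k => dB.getD k 0)
        = PySem.List.max? (PySem.Set.ofList ks) (fun k => (ks.count k : Int)) := by
      rw [hkeysB]
      apply max?_congr
      intro k hk
      have hkks : k ∈ ks := (PySem.Set.mem_ofList ks k).mp hk
      rw [hdBks, getD_foldl_insert_val, hmap, if_pos hk, hval k hkks]
    have hheadA : (PySem.List.sorted (PySem.Dict.counter ks).items (fun item => item.2) true).head?
        = (PySem.List.max? (PySem.Set.ofList ks) (fun k => (ks.count k : Int))).map
            (fun k => (k, (ks.count k : Int))) := by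
      rw [head?_sorted_rev, PySem.Dict.items_counter, max?_map]
    obtain ⟨m, hm⟩ : ∃ m, PySem.List.max? (PySem.Set.ofList ks) (fun k => (ks.count k : Int)) = some m := by
      cases hmm : PySem.List.max? (PySem.Set.ofList ks) (fun k => (ks.count k : Int)) with
      | none => exact absurd ((PySem.List.max?_eq_none_iff _ _).mp hmm) hne
      | some m => exact ⟨m, rfl⟩
    have pyGet?_zero : ∀ (l : List (String × Int)), PySem.List.pyGet? l 0 = l.head? := by
      intro l; cases l <;> simp [PySem.List.pyGet?, PySem.List.pyIdx?]
    have hg0 : PySem.List.pyGet?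
        (PySem.List.sorted (PySem.Dict.counter ks).items (fun item => item.2) true) 0
        = some (m, (ks.count m : Int)) := by
      rw [pyGet?_zero, hheadA, hm]; rfl
    rw [hg0, hmaxB, hm]
  exact Prod.ext hitems hsel
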